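-- pv_equiv track=rewrite | github.com/Finrandojin/alexandria-audiobook | app/generate_audiobook.py | group_into_chunks
-- ===== SOURCE A (Python) =====
-- MAX_CHUNK_CHARS = 500
--
-- def group_into_chunks(script_entries, max_chars=MAX_CHUNK_CHARS):
--     """Group consecutive entries by same speaker into chunks up to max_chars"""
--     if not script_entries:
--         return []
--
--     chunks = []
--     current_speaker = script_entries[0].get("speaker")
--     current_text = script_entries[0].get("text", "")
--     current_style = script_entries[0].get("style", "")
--
--     for entry in script_entries[1:]:
--         speaker = entry.get("speaker")
--         text = entry.get("text", "")
--         style = entry.get("style", "")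
--
--         if speaker == current_speaker:
--             combined = current_text + " " + text
--             if len(combined) <= max_chars:
--                 current_text = combined
--                 # Keep the more specific style if available
--                 if style and not current_style:
--                     current_style = style
--             else:
--                 chunks.append({
--                     "speaker": current_speaker,
--                     "text": current_text,
--                     "style": current_style
--                 })
--                 current_text = text
--                 current_style = style
--         else:
--             chunks.append({
--                 "speaker": current_speaker,
--                 "text": current_text,
--                 "style": current_style
--             })
--             current_speaker = speaker
--             current_text = text
--             current_style = style
--
--     # Don't forget the last chunk
--     chunks.append({
--         "speaker": current_speaker,
--         "text": current_text,
--         "style": current_style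
--     })
--
--     return chunks
-- ===== SOURCE B (Python) =====
-- MAX_CHUNK_CHARS = 500
--
-- def group_into_chunks(script_entries, max_chars=MAX_CHUNK_CHARS):
--     """Two-pass: split into same-speaker runs, then greedily pack each run."""
--     # pass 1: runs of consecutive entries sharing a speaker
--     runs = []
--     i, n = 0, len(script_entries)
--     while i < n:
--         sp = script_entries[i].get("speaker")
--         j = i + 1
--         while j < n and script_entries[j].get("speaker") == sp:
--             j += 1
--         runs.append((sp, script_entries[i:j]))
--         i = j
--     # pass 2: pack each run into size-bounded chunks
--     chunks = []
--     for sp, run in runs: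
--         cur_text = run[0].get("text", "")
--         cur_style = run[0].get("style", "")
--         for e in run[1:]:
--             text = e.get("text", "")
--             style = e.get("style", "")
--             combined = cur_text + " " + text
--             if len(combined) <= max_chars:
--                 cur_text = combined
--                 if style and not cur_style:
--                     cur_style = style
--             else:
--                 chunks.append({"speaker": sp, "text": cur_text, "style": cur_style})
--                 cur_text = text
--                 cur_style = style
--         chunks.append({"speaker": sp, "text": cur_text, "style": cur_style})
--     return chunks
-- ===== Notes on version B (the rewrite author's own statement) =====
-- stated objective: alternative
-- what changed: A fuses speaker-grouping and size-packing into one stateful loop; B first splits the list into runs of consecutive same-speaker entries (an index scan) and then greedily packs each run separately, so speaker boundaries and the size bound are handled in two independent passes.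
import Mathlib
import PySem

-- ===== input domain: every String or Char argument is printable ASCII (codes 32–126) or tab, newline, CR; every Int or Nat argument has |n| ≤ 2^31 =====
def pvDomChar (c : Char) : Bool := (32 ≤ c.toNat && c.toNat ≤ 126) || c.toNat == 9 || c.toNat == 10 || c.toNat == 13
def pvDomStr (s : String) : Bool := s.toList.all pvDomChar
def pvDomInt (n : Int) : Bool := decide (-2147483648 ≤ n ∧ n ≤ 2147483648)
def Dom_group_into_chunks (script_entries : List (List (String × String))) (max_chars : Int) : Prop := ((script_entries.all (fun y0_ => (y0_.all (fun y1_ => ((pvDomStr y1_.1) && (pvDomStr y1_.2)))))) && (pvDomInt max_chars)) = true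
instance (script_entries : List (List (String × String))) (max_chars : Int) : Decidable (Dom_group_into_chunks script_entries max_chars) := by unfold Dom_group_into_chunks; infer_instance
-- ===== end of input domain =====

-- B splits the input into runs of consecutive same-speaker entries first and then packs each
-- run into size-bounded chunks, instead of A's single fused stateful loop; same cost, alternative decomposition.

-- ===== PORT A =====
-- entry.get(k, "") / entry.get("speaker") on the dict `e`
def pvGet (e : List (String × String)) (k : String) : String :=
  (PySem.Dict.ofList e).getD k ""
def pvSpk (e : List (String × String)) : Option String :=
  (PySem.Dict.ofList e).get? "speaker"
-- the emitted chunk dict {"speaker": spk, "text": t, "style": st} (spk is a string under Pre_)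
def pvChunk (spk : Option String) (t st : String) : List (String × String) :=
  [("speaker", spk.getD ""), ("text", t), ("style", st)]

-- A's loop over script_entries[1:], state = (chunks, current_speaker, current_text, current_style)
def goA (max_chars : Int) (chunks : List (List (String × String))) (spk : Option String)
    (t st : String) : List (List (String × String)) → List (List (String × String))
  | [] => chunks ++ [pvChunk spk t st]
  | e :: rest =>
    let speaker := pvSpk e
    let text := pvGet e "text"
    let style := pvGet e "style"
    if speaker == spk then
      let combined := t ++ " " ++ text
      if PySem.Str.len combined ≤ max_chars then
        goA max_chars chunks spk combined (if style != "" && st == "" then style else st) rest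
      else
        goA max_chars (chunks ++ [pvChunk spk t st]) spk text style rest
    else
      goA max_chars (chunks ++ [pvChunk spk t st]) speaker text style rest

def group_into_chunks (script_entries : List (List (String × String))) (max_chars : Int) :
    List (List (String × String)) :=
  match script_entries with
  | [] => []
  | e :: rest => goA max_chars [] (pvSpk e) (pvGet e "text") (pvGet e "style") rest

-- ===== PORT B =====
-- pass 1: runs of consecutive entries sharing a speaker (inner while = matching prefix scan)
def splitRuns : List (List (String × String)) → List (Option String × List (List (String × String)))
  | [] => []
  | e :: rest =>
    let sp := pvSpk e
    (sp, e :: rest.takeWhile (fun x => pvSpk x == sp)) ::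
      splitRuns (rest.dropWhile (fun x => pvSpk x == sp))
  termination_by xs => xs.length
  decreasing_by
    simp only [List.length_cons]
    exact Nat.lt_succ_of_le (List.length_dropWhile_le _ _)

-- pass 2 inner loop: pack a run's remaining entries, state = (cur_text, cur_style)
def packGo (max_chars : Int) (sp : Option String) (t st : String) :
    List (List (String × String)) → List (List (String × String))
  | [] => [pvChunk sp t st]
  | e :: es =>
    let text := pvGet e "text"
    let style := pvGet e "style"
    let combined := t ++ " " ++ text
    if PySem.Str.len combined ≤ max_chars then
      packGo max_chars sp combined (if style != "" && st == "" then style else st) es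
    else
      pvChunk sp t st :: packGo max_chars sp text style es

def packRun (max_chars : Int) (r : Option String × List (List (String × String))) :
    List (List (String × String)) :=
  match r with
  | (_, []) => []
  | (sp, e :: es) => packGo max_chars sp (pvGet e "text") (pvGet e "style") es

def group_into_chunks_alt (script_entries : List (List (String × String))) (max_chars : Int) :
    List (List (String × String)) :=
  (splitRuns script_entries).flatMap (packRun max_chars)

-- ===== PRECONDITION & SPEC =====
-- Pre_ excludes entries without a "speaker" key: there Python A (and B) put None — not a string,
-- so the output is not a value of the declared type List (List (String × String)).
def Pre_group_into_chunks (script_entries : List (List (String × String))) (max_chars : Int) : Prop :=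
  script_entries.all (fun e => (PySem.Dict.ofList e).contains "speaker") = true
-- (Only the "speaker" key is required: A reads the "text" and "style" keys with a default of "",
--  so an entry with 0 or 1 of those keys is fine; max_chars is unrestricted — A's module default is 500,
--  but any value, e.g. -1 or 0, still lets A return normally.)
instance (script_entries : List (List (String × String))) (max_chars : Int) : Decidable (Pre_group_into_chunks script_entries max_chars) := by unfold Pre_group_into_chunks; infer_instance

def pvWitness_group_into_chunks : (List (List (String × String))) × Int :=
  ([[("speaker", "a"), ("text", "hi")], [("speaker", "a"), ("text", "there"), ("style", "warm")],
    [("speaker", "b"), ("text", "ok")]], 500)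

def Spec_group_into_chunks (script_entries : List (List (String × String))) (max_chars : Int) (out : List (List (String × String))) : Prop := out = group_into_chunks_alt script_entries max_chars
instance (script_entries : List (List (String × String))) (max_chars : Int) (out : List (List (String × String))) : Decidable (Spec_group_into_chunks script_entries max_chars out) := by unfold Spec_group_into_chunks; infer_instance

-- ===== CLAIM (what is proved, stated in full; the proofs are below) =====
def Claim_equal_group_into_chunks : Prop := ∀ (script_entries : List (List (String × String))) (max_chars : Int), Dom_group_into_chunks script_entries max_chars → Pre_group_into_chunks script_entries max_chars → Spec_group_into_chunks script_entries max_chars (group_into_chunks script_entries max_chars)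

-- ===== LEMMAS AND PROOFS =====

theorem goA_acc (m : Int) (rest : List (List (String × String))) :
    ∀ (chunks : List (List (String × String))) (spk : Option String) (t st : String),
    goA m chunks spk t st rest = chunks ++ goA m [] spk t st rest := by
  induction rest with
  | nil => intro chunks spk t st; simp [goA]
  | cons e es ih =>
    intro chunks spk t st
    simp only [goA, List.nil_append]
    by_cases h1 : (pvSpk e == spk) = true
    · simp only [h1, if_true]
      by_cases h2 : PySem.Str.len (t ++ " " ++ pvGet e "text") ≤ m
      · simp only [if_pos h2]; exact ih ..
      · simp only [if_neg h2]
        rw [ih (chunks ++ [pvChunk spk t st]), ih [pvChunk spk t st]]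
        simp
    · simp only [h1, Bool.false_eq_true, if_false]
      rw [ih (chunks ++ [pvChunk spk t st]), ih [pvChunk spk t st]]
      simp

theorem goA_eq_pack (m : Int) (rest : List (List (String × String))) :
    ∀ (spk : Option String) (t st : String),
    goA m [] spk t st rest =
      packGo m spk t st (rest.takeWhile (fun x => pvSpk x == spk)) ++
        (splitRuns (rest.dropWhile (fun x => pvSpk x == spk))).flatMap (packRun m) := by
  induction rest with
  | nil => intro spk t st; simp [goA, packGo, splitRuns]
  | cons e es ih =>
    intro spk t st
    by_cases h1 : (pvSpk e == spk) = true
    · simp only [goA, h1, if_true, List.takeWhile_cons, List.dropWhile_cons]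
      by_cases h2 : PySem.Str.len (t ++ " " ++ pvGet e "text") ≤ m
      · simp only [if_pos h2, packGo]
        exact ih ..
      · simp only [if_neg h2, packGo]
        rw [goA_acc, ih]
        simp
    · simp only [goA, h1, if_false, List.takeWhile_cons, List.dropWhile_cons, Bool.false_eq_true]
      rw [goA_acc, ih]
      simp only [packGo, splitRuns, List.flatMap_cons, packRun]
      simp

-- ===== VERDICT (by name: the statement is the Claim_ definition above) =====
theorem group_into_chunks_spec : Claim_equal_group_into_chunks := by
  intro script_entries max_chars _ _
  unfold Spec_group_into_chunks
  cases script_entries with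
  | nil => simp [group_into_chunks, group_into_chunks_alt, splitRuns]
  | cons e rest =>
    show goA max_chars [] (pvSpk e) (pvGet e "text") (pvGet e "style") rest = _
    rw [goA_eq_pack]
    simp [group_into_chunks_alt, splitRuns, packRun]
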